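-- pv_equiv track=rewrite | github.com/MartinDigard/ProjeTambouille | 3_evaluation/evaluation.py | prepa_eval
-- ===== SOURCE A (Python) =====
-- def prepa_eval(balises_ingr, entete_ingr, trouves, corrects):
--     """
--     Sortie : matrice (vpos, fpos, vneg, fneg)
--     """
--     if len(balises_ingr) != 0:
--         ingredient_balises = balises_ingr[0].lower()
--
--         def lire_entete(liste_entete, nouvelle_liste=None):
--             if nouvelle_liste is None:
--                 nouvelle_liste = []
--             if len(liste_entete) != 0:
--                 ingredient_entete = liste_entete[0].lower()
--                 if ingredient_balises in ingredient_entete: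
--                     return lire_entete(liste_entete[1:], nouvelle_liste)
--                 nouvelle_liste.append(ingredient_entete)
--                 return lire_entete(liste_entete[1:], nouvelle_liste)
--             return nouvelle_liste
--         entete_ingr = lire_entete(entete_ingr)
--         return prepa_eval(balises_ingr[1:], entete_ingr, trouves, corrects)
--     fneg = len(entete_ingr)
--     vpos = corrects - fneg
--     fpos = trouves - vpos
--     return vpos, fpos, fneg
-- ===== SOURCE B (Python) =====
-- def prepa_eval(balises_ingr, entete_ingr, trouves, corrects):
--     """
--     Sortie : matrice (vpos, fpos, vneg, fneg)
--     """
--     tags = [b.lower() for b in balises_ingr]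
--     fneg = sum(1 for e in entete_ingr
--                if not any(t in e.lower() for t in tags))
--     vpos = corrects - fneg
--     fpos = trouves - vpos
--     return vpos, fpos, fneg
-- ===== Notes on version B (the rewrite author's own statement) =====
-- stated objective: faster
-- what changed: Replaced the double recursion with list slicing and a rebuilt filtered list per tag by a single pass that counts header entries containing no lowercased tag.
import Mathlib
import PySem

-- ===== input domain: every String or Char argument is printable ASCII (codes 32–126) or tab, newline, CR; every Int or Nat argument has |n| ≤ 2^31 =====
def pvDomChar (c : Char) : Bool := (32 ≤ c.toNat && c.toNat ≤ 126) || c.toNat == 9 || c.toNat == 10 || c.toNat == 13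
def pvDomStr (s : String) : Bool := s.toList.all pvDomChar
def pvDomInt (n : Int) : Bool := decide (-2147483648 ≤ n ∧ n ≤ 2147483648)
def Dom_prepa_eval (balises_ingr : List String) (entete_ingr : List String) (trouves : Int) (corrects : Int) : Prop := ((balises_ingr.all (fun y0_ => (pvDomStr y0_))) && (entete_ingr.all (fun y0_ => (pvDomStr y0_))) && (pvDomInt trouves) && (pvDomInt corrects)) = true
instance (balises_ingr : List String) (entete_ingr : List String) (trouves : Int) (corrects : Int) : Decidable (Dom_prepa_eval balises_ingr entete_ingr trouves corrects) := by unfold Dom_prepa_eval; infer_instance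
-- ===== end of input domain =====

-- B replaces A's slice-copy recursion (rebuilding a filtered list per tag) by one counting
-- pass over the header; objective: faster (asymptotic: no per-tag list rebuilding).


-- ===== PORT A =====
-- inner helper `lire_entete`: lowers each header entry, drops those containing the tag,
-- appends the kept (lowered) ones to the accumulator `nouvelle_liste`
def lireEntete (ingredient_balises : String) (liste_entete : List String) (nouvelle_liste : List String) : List String :=
  match liste_entete with
  | [] => nouvelle_liste
  | e :: rest =>
      let ingredient_entete := PySem.Str.lower e
      if PySem.Str.isIn ingredient_balises ingredient_entete then
        lireEntete ingredient_balises rest nouvelle_liste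
      else
        lireEntete ingredient_balises rest (nouvelle_liste ++ [ingredient_entete])

def prepa_eval (balises_ingr : List String) (entete_ingr : List String) (trouves : Int) (corrects : Int) : List Int :=
  match balises_ingr with
  | b :: rest =>
      let ingredient_balises := PySem.Str.lower b
      prepa_eval rest (lireEntete ingredient_balises entete_ingr []) trouves corrects
  | [] =>
      let fneg : Int := entete_ingr.length
      let vpos := corrects - fneg
      let fpos := trouves - vpos
      [vpos, fpos, fneg]

-- ===== PORT B =====
def prepa_eval_alt (balises_ingr : List String) (entete_ingr : List String) (trouves : Int) (corrects : Int) : List Int :=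
  let tags := balises_ingr.map PySem.Str.lower
  let fneg : Int :=
    entete_ingr.countP (fun e => ! tags.any (fun t => PySem.Str.isIn t (PySem.Str.lower e)))
  let vpos := corrects - fneg
  let fpos := trouves - vpos
  [vpos, fpos, fneg]

-- ===== PRECONDITION & SPEC =====
def Spec_prepa_eval (balises_ingr : List String) (entete_ingr : List String) (trouves : Int) (corrects : Int) (out : List Int) : Prop := out = prepa_eval_alt balises_ingr entete_ingr trouves corrects
instance (balises_ingr : List String) (entete_ingr : List String) (trouves : Int) (corrects : Int) (out : List Int) : Decidable (Spec_prepa_eval balises_ingr entete_ingr trouves corrects out) := by unfold Spec_prepa_eval; infer_instance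

-- ===== CLAIM (what is proved, stated in full; the proofs are below) =====
def Claim_equal_prepa_eval : Prop := ∀ (balises_ingr : List String) (entete_ingr : List String) (trouves : Int) (corrects : Int), Dom_prepa_eval balises_ingr entete_ingr trouves corrects → Spec_prepa_eval balises_ingr entete_ingr trouves corrects (prepa_eval balises_ingr entete_ingr trouves corrects)

-- ===== LEMMAS AND PROOFS =====

theorem pv_ofNat_toNat (n : Nat) (h : Nat.isValidChar n) : (Char.ofNat n).toNat = n := by
  unfold Char.ofNat; rw [dif_pos h]; rfl

theorem pv_lowerChar_idem (c : Char) :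
    PySem.Chars.lowerChar (PySem.Chars.lowerChar c) = PySem.Chars.lowerChar c := by
  simp only [PySem.Chars.lowerChar, PySem.Chars.isupper]
  split_ifs with h1 h2 <;> try rfl
  exfalso
  simp only [Bool.and_eq_true, decide_eq_true_eq, Char.le_def, UInt32.le_iff_toNat_le] at h1 h2
  have hA : ('A').val.toNat = 65 := rfl
  have hZ : ('Z').val.toNat = 90 := rfl
  have hc : c.toNat = c.val.toNat := rfl
  have hv : (Char.ofNat (c.toNat + 32)).val.toNat = c.toNat + 32 :=
    pv_ofNat_toNat (c.toNat + 32) (by left; show c.toNat + 32 < 55296; omega)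
  omega

theorem pv_lower_idem (s : String) :
    PySem.Str.lower (PySem.Str.lower s) = PySem.Str.lower s := by
  apply String.toList_inj.mp
  simp [PySem.Str.lower, PySem.Chars.lower, List.map_map, Function.comp, pv_lowerChar_idem]

-- lire_entete builds acc ++ (lowered entries not containing the tag)
theorem pv_lireEntete_eq (ib : String) (l acc : List String) :
    lireEntete ib l acc
      = acc ++ (l.map PySem.Str.lower).filter (fun x => ! PySem.Str.isIn ib x) := by
  induction l generalizing acc with
  | nil => simp [lireEntete]
  | cons e rest ih =>
      simp only [lireEntete, List.map_cons, List.filter_cons]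
      by_cases h : PySem.Str.isIn ib (PySem.Str.lower e) = true
      · simp only [PySem.Str.isIn, PySem.Str.toList_lower] at h
        simp [h, ih]
      · simp only [Bool.not_eq_true, PySem.Str.isIn, PySem.Str.toList_lower] at h
        simp [h, ih]

-- the count B maintains, as a function of the remaining tag list
theorem pv_main (bs : List String) (l : List String) (t c : Int) :
    prepa_eval bs l t c
      = prepa_eval_alt bs l t c := by
  induction bs generalizing l with
  | nil => simp [prepa_eval, prepa_eval_alt]
  | cons b rest ih =>
      have hcount : ∀ l' : List String,
          List.countP ((fun a =>
              (!(rest.map PySem.Str.lower).any fun t => PySem.Str.isIn t (PySem.Str.lower a)) &&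
                !PySem.Str.isIn (PySem.Str.lower b) a) ∘ PySem.Str.lower) l'
            = List.countP (fun e =>
                !((PySem.Str.lower b :: rest.map PySem.Str.lower).any fun t =>
                    PySem.Str.isIn t (PySem.Str.lower e))) l' := by
        intro l'
        apply List.countP_congr
        intro x _
        simp only [Function.comp, List.any_cons, Bool.not_or, pv_lower_idem]
        rw [Bool.and_comm]
      simp only [prepa_eval, pv_lireEntete_eq, List.nil_append, ih, prepa_eval_alt,
        List.map_cons, List.countP_filter, List.countP_map, hcount]

-- ===== VERDICT (by name: the statement is the Claim_ definition above) =====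
theorem prepa_eval_spec : Claim_equal_prepa_eval := by
  intro bs es t c _
  show prepa_eval bs es t c = prepa_eval_alt bs es t c
  exact pv_main bs es t c
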